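-- pv_equiv track=rewrite | github.com/AtharvaParanjpe/NLP_project | NLP Project/semeval-2020-task-7-dataset/Final/Dense_Model_2_1&2__+_Original.py | get_bert_params
-- ===== SOURCE A (Python) =====
-- maxLengthPadding = 80
--
-- def get_bert_params(tokens):
--     attn_mask = []
--     seg_ids = []
--     if(len(tokens)<maxLengthPadding):
--         attn_mask = [1]*len(tokens) + [0]*(maxLengthPadding-len(tokens))
--     else:
--         attn_mask = [1]*maxLengthPadding
--     segment = 0
--     for x in tokens:
--         seg_ids.append(segment)
--         if(x=='[SEP]'):
--             segment = 1
--     seg_ids+=[0]*(maxLengthPadding-len(tokens))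
--     return attn_mask,seg_ids
-- ===== SOURCE B (Python) =====
-- maxLengthPadding = 80
--
-- def get_bert_params(tokens):
--     n = len(tokens)
--     pad = [0] * (maxLengthPadding - n)
--     attn_mask = [1] * min(n, maxLengthPadding) + pad
--     if '[SEP]' in tokens:
--         i = tokens.index('[SEP]')
--         seg_ids = [0] * (i + 1) + [1] * (n - i - 1) + pad
--     else:
--         seg_ids = [0] * n + pad
--     return attn_mask, seg_ids
-- ===== Notes on version B (the rewrite author's own statement) =====
-- stated objective: alternative
-- what changed: Segment ids are built by locating the first '[SEP]' with index() and concatenating three constant slices, instead of A's stateful per-token flag loop; the attention mask uses min(len,80) instead of a branch.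
import Mathlib
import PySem

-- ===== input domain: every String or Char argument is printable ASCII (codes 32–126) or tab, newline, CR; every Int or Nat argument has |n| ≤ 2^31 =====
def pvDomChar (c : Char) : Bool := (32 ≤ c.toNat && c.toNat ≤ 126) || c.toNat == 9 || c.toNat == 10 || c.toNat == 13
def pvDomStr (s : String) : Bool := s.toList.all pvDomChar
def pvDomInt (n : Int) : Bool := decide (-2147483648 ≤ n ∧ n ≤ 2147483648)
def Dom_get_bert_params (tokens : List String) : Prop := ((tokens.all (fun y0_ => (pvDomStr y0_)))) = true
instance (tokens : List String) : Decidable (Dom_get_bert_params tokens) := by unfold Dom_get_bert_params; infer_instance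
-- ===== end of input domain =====

-- B replaces A's stateful per-token segment flag by an index-split at the first '[SEP]' (different decomposition; same cost).


-- ===== PORT A =====
-- the loop body of A's for-loop: append the current segment, switch to 1 after '[SEP]'
def pvSegStep (acc : List Int × Int) (x : String) : List Int × Int :=
  (acc.1 ++ [acc.2], if x == "[SEP]" then 1 else acc.2)

def get_bert_params (tokens : List String) : List Int × List Int :=
  let attn_mask : List Int :=
    if tokens.length < 80 then
      List.replicate tokens.length 1 ++ List.replicate ((80 - (tokens.length : Int)).toNat) 0
    else
      List.replicate 80 1
  let r := tokens.foldl pvSegStep ([], 0)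
  (attn_mask, r.1 ++ List.replicate ((80 - (tokens.length : Int)).toNat) 0)

-- ===== PORT B =====
def get_bert_params_alt (tokens : List String) : List Int × List Int :=
  let n := tokens.length
  let pad : List Int := List.replicate ((80 - (n : Int)).toNat) 0
  let attn_mask : List Int := List.replicate (min n 80) 1 ++ pad
  let seg_ids : List Int :=
    match PySem.List.index? tokens "[SEP]" with
    | some i => List.replicate (i + 1) (0 : Int) ++ List.replicate (n - i - 1) 1 ++ pad
    | none => List.replicate n (0 : Int) ++ pad
  (attn_mask, seg_ids)

-- ===== PRECONDITION & SPEC =====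
def Spec_get_bert_params (tokens : List String) (out : List Int × List Int) : Prop := out = get_bert_params_alt tokens
instance (tokens : List String) (out : List Int × List Int) : Decidable (Spec_get_bert_params tokens out) := by unfold Spec_get_bert_params; infer_instance

-- ===== CLAIM (what is proved, stated in full; the proofs are below) =====
def Claim_equal_get_bert_params : Prop := ∀ (tokens : List String), Dom_get_bert_params tokens → Spec_get_bert_params tokens (get_bert_params tokens)

-- ===== LEMMAS AND PROOFS =====

-- once the segment flag is 1, the loop just appends 1s
theorem pvSeg_loop1 (ts : List String) : ∀ (acc : List Int),
    ts.foldl pvSegStep (acc, 1) = (acc ++ List.replicate ts.length 1, 1) := by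
  induction ts with
  | nil => simp
  | cons x xs ih =>
    intro acc
    simp only [List.foldl_cons, pvSegStep]
    have : (if x == "[SEP]" then (1 : Int) else 1) = 1 := by split <;> rfl
    rw [this, ih]
    simp [List.replicate_succ, List.append_assoc]

-- with the flag still 0, the loop's output is the index-split at the first '[SEP]'
theorem pvSeg_loop0 (ts : List String) : ∀ (acc : List Int),
    (ts.foldl pvSegStep (acc, 0)).1 =
      acc ++ (match PySem.List.index? ts "[SEP]" with
        | some i => List.replicate (i + 1) (0 : Int) ++ List.replicate (ts.length - i - 1) 1
        | none => List.replicate ts.length (0 : Int)) := by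
  induction ts with
  | nil => simp
  | cons x xs ih =>
    intro acc
    simp only [List.foldl_cons, pvSegStep]
    by_cases h : x = "[SEP]"
    · subst h
      simp only [beq_self_eq_true, if_true, pvSeg_loop1, PySem.List.index?_cons_self]
      simp [List.replicate_succ, List.append_assoc]
    · have hb : (x == "[SEP]") = false := by simp [h]
      simp only [hb, Bool.false_eq_true, if_false, ih]
      rw [PySem.List.index?_cons_of_ne xs h]
      cases hix : PySem.List.index? xs "[SEP]" with
      | none =>
        show acc ++ [(0:Int)] ++ List.replicate xs.length 0 = acc ++ List.replicate (xs.length + 1) 0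
        simp [List.replicate_succ, List.append_assoc]
      | some i =>
        have hi : i < xs.length := by
          obtain ⟨hk, _, _⟩ := PySem.List.getElem_of_index?_eq_some hix
          exact hk
        simp only [Option.map_some]
        have h2 : (0 : Int) :: List.replicate (i + 1) (0 : Int) = List.replicate (i + 1 + 1) 0 := by
          simp [List.replicate_succ]
      
        simp [List.length_cons, List.append_assoc, ← h2]

-- ===== VERDICT (by name: the statement is the Claim_ definition above) =====
theorem get_bert_params_spec : Claim_equal_get_bert_params := by
  intro tokens _
  unfold Spec_get_bert_params get_bert_params get_bert_params_alt
  simp only [Prod.mk.injEq]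
  constructor
  · by_cases h : tokens.length < 80
    · have : min tokens.length 80 = tokens.length := by omega
      simp [h, this]
    · have h80 : min tokens.length 80 = 80 := by omega
      have hz : ((80 - (tokens.length : Int)).toNat) = 0 := by omega
      simp [h, h80, hz]
  · rw [pvSeg_loop0 tokens []]
    cases hix : PySem.List.index? tokens "[SEP]" <;> simp [List.append_assoc]
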